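-- pv_equiv track=rewrite | github.com/lifecycles1/competitive-programming | codesignal/interview_practice/data structures/graphs/singlePointOfFailure.py | solution
-- ===== SOURCE A (Python) =====
-- def solution(connections):
--     n = len(connections)
--     # Initialize a variable to keep track of the number of cables that are a single point of failure
--     single_point_of_failures = 0
--     # iterate over all the devices
--     for i in range(n):
--         # iterate over all the devices
--         for j in range(n):
--             # check if there is a cable between devices i and j
--             if connections[i][j] == 1:
--                 # remove the current cable between devices i and j
--                 connections[i][j] = 0
--                 # check whether the network is still connected or not
--                 if not is_connected(connections,n):
--                     #increment the number of single point of failure cables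
--                     single_point_of_failures += 1
--                 # add the removed cable back
--                 connections[i][j] = 1
--     return single_point_of_failures
--
-- def is_connected(connections,n):
--     # Initialize the visited array to check the connectivity
--     visited = [False] * n
--     # start DFS from node 0
--     dfs(connections, 0, visited)
--     # check if all the devices are connected
--     return all(visited)
--
-- def dfs(connections, v, visited):
--     visited[v] = True
--     for i in range(len(connections)):
--         if connections[v][i] and not visited[i]:
--             dfs(connections, i, visited)
-- ===== SOURCE B (Python) =====
-- def solution(connections):
--     n = len(connections)
--     ones = [(i, j) for i in range(n) for j in range(n) if connections[i][j] == 1]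
--     if not _reaches_all(connections, n):
--         # removing an edge can never reconnect a disconnected network:
--         # every cable is already a point of failure
--         return len(ones)
--     cut = [list(row) for row in connections]
--     count = 0
--     for (i, j) in ones:
--         cut[i][j] = 0
--         if not _reaches_all(cut, n):
--             count += 1
--         cut[i][j] = 1
--     return count
--
--
-- def _reaches_all(g, n):
--     # fixpoint expansion of the set reachable from device 0 (no recursion)
--     reach = [False] * n
--     if n:
--         reach[0] = True
--     changed = n > 0
--     while changed:
--         changed = False
--         for v in range(n):
--             if reach[v]:
--                 for w in range(n):
--                     if g[v][w] and not reach[w]: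
--                         reach[w] = True
--                         changed = True
--     return all(reach)
-- ===== Notes on version B (the rewrite author's own statement) =====
-- stated objective: alternative
-- what changed: B first computes reachability of the intact network once and, when it is already disconnected, returns the edge count directly with no per-edge test; reachability is computed by an iterative fixpoint expansion over a boolean reach array instead of A's recursive DFS; B leaves its argument untouched (it zeroes and restores entries of a private copy) while A temporarily mutates and restores the argument itself.
-- outside the precondition, e.g. on solution([[0, 1], [1]]): A raises IndexError, B raises IndexError
import Mathlib
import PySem

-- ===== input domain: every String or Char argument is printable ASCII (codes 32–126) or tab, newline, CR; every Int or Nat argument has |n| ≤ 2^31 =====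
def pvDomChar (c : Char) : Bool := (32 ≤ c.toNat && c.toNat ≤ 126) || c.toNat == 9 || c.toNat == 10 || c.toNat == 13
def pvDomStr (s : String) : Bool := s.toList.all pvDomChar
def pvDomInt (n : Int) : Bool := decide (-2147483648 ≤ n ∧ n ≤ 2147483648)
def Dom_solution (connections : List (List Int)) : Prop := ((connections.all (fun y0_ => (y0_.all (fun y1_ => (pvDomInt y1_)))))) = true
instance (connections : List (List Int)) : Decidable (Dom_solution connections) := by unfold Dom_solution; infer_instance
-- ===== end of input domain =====

-- B tests edge removal once on the intact network (returning the edge count outright when it is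
-- already disconnected) and computes reachability by an iterative fixpoint expansion instead of A's
-- per-edge recursive DFS; A temporarily mutates its argument and restores it (net effect nil), B never
-- mutates it.  Equivalence is about the return value.

-- ===== PORT A =====
-- connections[v][i]: total via getD; indices are in range on every Pre_ input
def pvEnt (c : List (List Int)) (v i : Nat) : Int := (c.getD v []).getD i 0

-- recursive dfs of A; fuel bounds the recursion depth (each nested call marks a previously
-- unvisited node, so depth ≤ n; the callers pass fuel n+1, which is never exhausted)
def pvDfsA (c : List (List Int)) : Nat → Nat → List Bool → List Bool
  | 0, _, visited => visited
  | fuel+1, v, visited =>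
    (List.range c.length).foldl
      (fun vis i =>
        if pvEnt c v i ≠ 0 ∧ vis.getD i false = false then pvDfsA c fuel i vis else vis)
      (visited.set v true)

def pvIsConnA (c : List (List Int)) (n : Nat) : Bool :=
  (pvDfsA c (n + 1) 0 (List.replicate n false)).all id

-- the matrix A tests: connections with entry (i,j) set to 0 (A mutates, tests, restores)
def pvCut (c : List (List Int)) (i j : Nat) : List (List Int) :=
  c.set i ((c.getD i []).set j 0)

def solution (connections : List (List Int)) : Int :=
  (List.range connections.length).foldl
    (fun acc i =>
      (List.range connections.length).foldl
        (fun acc j =>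
          if pvEnt connections i j = 1 then
            if pvIsConnA (pvCut connections i j) connections.length = false then acc + 1
            else acc
          else acc)
        acc)
    0

-- ===== PORT B =====
-- one full pass of the fixpoint expansion: state (reach, changed)
def pvRound (g : List (List Int)) (st : List Bool × Bool) : List Bool × Bool :=
  (List.range g.length).foldl
    (fun st v =>
      if st.1.getD v false then
        (List.range g.length).foldl
          (fun st w =>
            if pvEnt g v w ≠ 0 ∧ st.1.getD w false = false then (st.1.set w true, true)
            else st)
          st
      else st)
    st

-- the `while changed` loop; fuel n suffices (every repeated round marks a new device)
def pvLoopB (g : List (List Int)) : Nat → List Bool → List Bool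
  | 0, r => r
  | f+1, r =>
    let st := pvRound g (r, false)
    if st.2 then pvLoopB g f st.1 else st.1

def pvReachAllB (g : List (List Int)) (n : Nat) : Bool :=
  let r0 := List.replicate n false
  let r1 := if 0 < n then r0.set 0 true else r0
  (if 0 < n then pvLoopB g n r1 else r1).all id

def pvOnes (c : List (List Int)) : List (Nat × Nat) :=
  (List.range c.length).flatMap
    (fun i => ((List.range c.length).filter (fun j => pvEnt c i j = 1)).map (fun j => (i, j)))

def solution_alt (connections : List (List Int)) : Int :=
  let n := connections.length
  let ones := pvOnes connections
  if pvReachAllB connections n = false then (ones.length : Int)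
  else
    -- the loop zeroes cut[i][j], tests, and writes the 1 back: each test runs on the
    -- once-copied matrix with exactly entry (p.1, p.2) zeroed
    let cut0 := connections.map (fun row => row)
    ones.foldl
      (fun cnt p =>
        let cut := cut0.set p.1 ((cut0.getD p.1 []).set p.2 0)
        if pvReachAllB cut n = false then cnt + 1 else cnt)
      0

-- ===== PRECONDITION & SPEC =====
-- Pre_ excludes ragged matrices (some row shorter than the number of rows): on those the Python A
-- raises IndexError (and B raises there too); on every other input A returns normally.
def Pre_solution (connections : List (List Int)) : Prop :=
  ∀ row ∈ connections, connections.length ≤ row.length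
instance (connections : List (List Int)) : Decidable (Pre_solution connections) := by
  unfold Pre_solution; infer_instance

def pvWitness_solution : List (List Int) := [[0, 1], [1, 0]]

def Spec_solution (connections : List (List Int)) (out : Int) : Prop := out = solution_alt connections
instance (connections : List (List Int)) (out : Int) : Decidable (Spec_solution connections out) := by
  unfold Spec_solution; infer_instance

-- ===== CLAIM (what is proved, stated in full; the proofs are below) =====
def Claim_equal_solution : Prop := ∀ (connections : List (List Int)), Dom_solution connections → Pre_solution connections → Spec_solution connections (solution connections)

-- ===== LEMMAS AND PROOFS =====

-- the edge relation of a matrix, and reachability from device 0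
def pvE (c : List (List Int)) (v w : Nat) : Prop :=
  v < c.length ∧ w < c.length ∧ pvEnt c v w ≠ 0
def pvReach (c : List (List Int)) (w : Nat) : Prop := Relation.ReflTransGen (pvE c) 0 w

-- pointwise order on boolean reach arrays
def pvLeB (r s : List Bool) : Prop := ∀ a, r.getD a false = true → s.getD a false = true

lemma pvLeB_refl (r : List Bool) : pvLeB r r := fun _ h => h
lemma pvLeB_trans {r s t : List Bool} (h1 : pvLeB r s) (h2 : pvLeB s t) : pvLeB r t :=
  fun a h => h2 a (h1 a h)

lemma pvGetD_lt_len {r : List Bool} {a : Nat} (h : r.getD a false = true) : a < r.length := by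
  by_contra hc
  simp [List.getD_eq_getElem?_getD, List.getElem?_eq_none (by omega : r.length ≤ a)] at h

lemma pvGetD_set_self {α : Type} {r : List α} {v : Nat} {x d : α} (h : v < r.length) :
    (r.set v x).getD v d = x := by
  simp [List.getD_eq_getElem?_getD, h]

lemma pvGetD_set_other {α : Type} (r : List α) (v a : Nat) (x d : α) (h : a ≠ v) :
    (r.set v x).getD a d = r.getD a d := by
  simp [List.getD_eq_getElem?_getD, List.getElem?_set_ne (by omega : v ≠ a)]

lemma pvSet_true_le (r : List Bool) (v : Nat) : pvLeB r (r.set v true) := by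
  intro a h
  by_cases hav : a = v
  · subst hav; exact pvGetD_set_self (by simpa using pvGetD_lt_len h)
  · rw [pvGetD_set_other r v a true false hav]; exact h

lemma pvGetD_set_true_cases {r : List Bool} {v a : Nat}
    (h : (r.set v true).getD a false = true) : a = v ∨ r.getD a false = true := by
  by_cases hav : a = v
  · exact Or.inl hav
  · right; rwa [pvGetD_set_other r v a true false hav] at h

lemma pvGetD_replicate_false (n a : Nat) : (List.replicate n false).getD a false = false := by
  by_cases h : a < n
  · simp [List.getD_eq_getElem?_getD, h]
  · have hle : (List.replicate n false).length ≤ a := by simpa using (by omega : n ≤ a)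
    simp [List.getD_eq_getElem?_getD, List.getElem?_eq_none hle]

lemma pvCount_false_set_true {r : List Bool} {v : Nat} (hv : v < r.length)
    (hf : r.getD v false = false) : (r.set v true).count false + 1 = r.count false := by
  induction r generalizing v with
  | nil => simp at hv
  | cons b t ih =>
    cases v with
    | zero =>
      simp only [List.getD_cons_zero] at hf; subst hf
      simp
    | succ v' =>
      simp only [List.getD_cons_succ] at hf
      have := ih (v := v') (by simpa using hv) hf
      have hset : (b :: t).set (v' + 1) true = b :: t.set v' true := rfl
      rw [hset]
      simp only [List.count_cons]
      omega

lemma pvCount_false_mono : ∀ (r s : List Bool), s.length = r.length →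
    (∀ a, r.getD a false = true → s.getD a false = true) → s.count false ≤ r.count false := by
  intro r
  induction r with
  | nil => intro s hl _; simp_all
  | cons b t ih =>
    intro s hl h
    cases s with
    | nil => simp at hl
    | cons c u =>
      have hh : b = true → c = true := by
        intro hb; have := h 0 (by simpa using hb); simpa using this
      have ht : u.count false ≤ t.count false := by
        refine ih u (by simpa using hl) ?_
        intro a ha; have := h (a + 1) (by simpa using ha); simpa using this
      simp only [List.count_cons]
      cases b with
      | true => have := hh rfl; subst this; simpa using ht
      | false => cases c <;> simp only [beq_self_eq_true, if_pos] <;> simp <;> omega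


lemma pvCount_false_pos {r : List Bool} {v : Nat} (hv : v < r.length)
    (hf : r.getD v false = false) : 0 < r.count false := by
  have := pvCount_false_set_true hv hf; omega

-- a fold whose every step only adds marks only adds marks
lemma pvFoldB_mono {α : Type} (l : List α) (s : List Bool → α → List Bool)
    (hs : ∀ acc x, x ∈ l → pvLeB acc (s acc x)) (acc : List Bool) :
    pvLeB acc (l.foldl s acc) := by
  refine List.foldlRecOn l s (motive := fun r => pvLeB acc r) (pvLeB_refl acc) ?_
  intro b hb a ha
  exact pvLeB_trans hb (hs b a ha)

-- ===== A-side: the recursive dfs computes exactly the reachable set =====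

lemma pvDfsA_length (c : List (List Int)) :
    ∀ f v vis, (pvDfsA c f v vis).length = vis.length := by
  intro f
  induction f with
  | zero => intro v vis; rfl
  | succ f ih =>
    intro v vis
    show ((List.range c.length).foldl _ (vis.set v true)).length = vis.length
    have : ∀ r : List Bool, r.length = vis.length →
        (((List.range c.length)).foldl
          (fun vis' i => if pvEnt c v i ≠ 0 ∧ vis'.getD i false = false then pvDfsA c f i vis' else vis') r).length = vis.length := by
      intro r hr
      refine List.foldlRecOn _ _ (motive := fun (t : List Bool) => t.length = vis.length) hr ?_
      intro b hb a _
      split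
      · rw [ih a b]; exact hb
      · exact hb
    exact this _ (by simp)

lemma pvDfsA_mono (c : List (List Int)) :
    ∀ f v vis, pvLeB vis (pvDfsA c f v vis) := by
  intro f
  induction f with
  | zero => intro v vis; exact pvLeB_refl vis
  | succ f ih =>
    intro v vis
    show pvLeB vis ((List.range c.length).foldl _ (vis.set v true))
    refine pvLeB_trans (pvSet_true_le vis v) (pvFoldB_mono _ _ ?_ _)
    intro acc x _
    split
    · exact ih x acc
    · exact pvLeB_refl acc

lemma pvDfsA_succ_le (c : List (List Int)) (f v : Nat) (vis : List Bool) :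
    pvLeB (vis.set v true) (pvDfsA c (f + 1) v vis) := by
  show pvLeB _ ((List.range c.length).foldl _ (vis.set v true))
  refine pvFoldB_mono _ _ ?_ _
  intro acc x _
  split
  · exact pvDfsA_mono c f x acc
  · exact pvLeB_refl acc

lemma pvDfsA_marks (c : List (List Int)) {f v : Nat} {vis : List Bool}
    (hf : 0 < f) (hv : v < vis.length) : (pvDfsA c f v vis).getD v false = true := by
  obtain ⟨f', rfl⟩ : ∃ f', f = f' + 1 := ⟨f - 1, by omega⟩
  exact pvDfsA_succ_le c f' v vis v (pvGetD_set_self hv)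

lemma pvDfsA_sound (c : List (List Int)) :
    ∀ f v vis, v < c.length → ∀ a, (pvDfsA c f v vis).getD a false = true →
      vis.getD a false = true ∨ Relation.ReflTransGen (pvE c) v a := by
  intro f
  induction f with
  | zero => intro v vis _ a h; exact Or.inl h
  | succ f ih =>
    intro v vis hv a h
    have main : ∀ r : List Bool,
        (∀ b, r.getD b false = true → vis.getD b false = true ∨ Relation.ReflTransGen (pvE c) v b) →
        ∀ b, (((List.range c.length)).foldl
          (fun vis' i => if pvEnt c v i ≠ 0 ∧ vis'.getD i false = false then pvDfsA c f i vis' else vis') r).getD b false = true →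
          vis.getD b false = true ∨ Relation.ReflTransGen (pvE c) v b := by
      intro r hr
      refine List.foldlRecOn _ _
        (motive := fun (t : List Bool) => ∀ b, t.getD b false = true → vis.getD b false = true ∨ Relation.ReflTransGen (pvE c) v b) hr ?_
      intro acc hacc x hx b hb
      by_cases hcond : pvEnt c v x ≠ 0 ∧ acc.getD x false = false
      · rw [if_pos hcond] at hb
        have hxn : x < c.length := by simpa using List.mem_range.mp hx
        rcases ih x acc hxn b hb with hb' | hb'
        · exact hacc b hb'
        · right
          exact Relation.ReflTransGen.head ⟨hv, hxn, hcond.1⟩ hb'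
      · rw [if_neg hcond] at hb
        exact hacc b hb
    refine main (vis.set v true) ?_ a h
    intro b hb
    rcases pvGetD_set_true_cases hb with rfl | hb'
    · exact Or.inr Relation.ReflTransGen.refl
    · exact Or.inl hb'

lemma pvDfsA_closed (c : List (List Int)) :
    ∀ f vis v, v < c.length → vis.length = c.length → vis.getD v false = false →
      vis.count false < f →
      ∀ a b, (pvDfsA c f v vis).getD a false = true → vis.getD a false = false →
        b < c.length → pvEnt c a b ≠ 0 → (pvDfsA c f v vis).getD b false = true := by
  intro f
  induction f with
  | zero => intro vis v _ _ _ hcf; exact absurd hcf (Nat.not_lt_zero _)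
  | succ f ih =>
    intro vis v hv hlen hvf hcf a b hRa hva hb hab
    have hvlen : v < vis.length := by rw [hlen]; exact hv
    have hf1 : 1 ≤ f := by
      have := pvCount_false_pos hvlen hvf
      omega
    have hmono_step : ∀ (acc : List Bool) (x : Nat),
        pvLeB acc (if pvEnt c v x ≠ 0 ∧ acc.getD x false = false then pvDfsA c f x acc else acc) := by
      intro acc x
      split
      · exact pvDfsA_mono c f x acc
      · exact pvLeB_refl acc
    -- every in-range neighbour of v is marked by the fold
    have hnb : ∀ (l : List Nat) (acc : List Bool), acc.length = c.length →
        ∀ b', b' ∈ l → b' < c.length → pvEnt c v b' ≠ 0 →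
        (l.foldl (fun vis' i => if pvEnt c v i ≠ 0 ∧ vis'.getD i false = false then pvDfsA c f i vis' else vis') acc).getD b' false = true := by
      intro l
      induction l with
      | nil => intro acc _ b' hb' _ _; simp at hb'
      | cons x l' ihl =>
        intro acc hlacc b' hb' hblt hent
        have hstep_len : ∀ y : Nat,
            ((if pvEnt c v y ≠ 0 ∧ acc.getD y false = false then pvDfsA c f y acc else acc) : List Bool).length = c.length := by
          intro y; split
          · rw [pvDfsA_length]; exact hlacc
          · exact hlacc
        rw [List.foldl_cons]
        rcases List.mem_cons.mp hb' with rfl | hmem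
        · have hmarked : ((if pvEnt c v b' ≠ 0 ∧ acc.getD b' false = false then pvDfsA c f b' acc else acc) : List Bool).getD b' false = true := by
            by_cases hcond : pvEnt c v b' ≠ 0 ∧ acc.getD b' false = false
            · rw [if_pos hcond]
              exact pvDfsA_marks c (by omega) (by rw [hlacc]; exact hblt)
            · rw [if_neg hcond]
              push Not at hcond
              simpa using hcond hent
          exact pvFoldB_mono l' _ (fun acc' x' _ => hmono_step acc' x') _ b' hmarked
        · exact ihl _ (hstep_len x) b' hmem hblt hent
    -- invariant: every node marked beyond vis.set v true is closed under edges
    have hmain : ((List.range c.length).foldl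
          (fun vis' i => if pvEnt c v i ≠ 0 ∧ vis'.getD i false = false then pvDfsA c f i vis' else vis')
          (vis.set v true)).length = c.length ∧
        (∀ a', (vis.set v true).getD a' false = true →
          ((List.range c.length).foldl
            (fun vis' i => if pvEnt c v i ≠ 0 ∧ vis'.getD i false = false then pvDfsA c f i vis' else vis')
            (vis.set v true)).getD a' false = true) ∧
        (∀ a' b', ((List.range c.length).foldl
            (fun vis' i => if pvEnt c v i ≠ 0 ∧ vis'.getD i false = false then pvDfsA c f i vis' else vis')
            (vis.set v true)).getD a' false = true →
          (vis.set v true).getD a' false = false → b' < c.length → pvEnt c a' b' ≠ 0 →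
          ((List.range c.length).foldl
            (fun vis' i => if pvEnt c v i ≠ 0 ∧ vis'.getD i false = false then pvDfsA c f i vis' else vis')
            (vis.set v true)).getD b' false = true) := by
      refine List.foldlRecOn _ _
        (motive := fun (t : List Bool) => t.length = c.length ∧
          (∀ a', (vis.set v true).getD a' false = true → t.getD a' false = true) ∧
          (∀ a' b', t.getD a' false = true → (vis.set v true).getD a' false = false →
            b' < c.length → pvEnt c a' b' ≠ 0 → t.getD b' false = true))
        ⟨by rw [List.length_set]; exact hlen, fun a' h => h, ?_⟩ ?_
      · intro a' b' h1 h2 _ _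
        rw [h1] at h2; exact absurd h2 (by simp)
      · intro t ht x hx
        by_cases hcond : pvEnt c v x ≠ 0 ∧ t.getD x false = false
        · rw [if_pos hcond]
          have hxlt : x < c.length := List.mem_range.mp hx
          refine ⟨by rw [pvDfsA_length]; exact ht.1,
            fun a' h => pvDfsA_mono c f x t a' (ht.2.1 a' h), ?_⟩
          intro a' b' ha' hset hb' hab'
          by_cases hta : t.getD a' false = true
          · exact pvDfsA_mono c f x t b' (ht.2.2 a' b' hta hset hb' hab')
          · have hcnt : t.count false < f := by
              have h1 : t.count false ≤ (vis.set v true).count false := by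
                refine pvCount_false_mono (vis.set v true) t ?_ ht.2.1
                rw [ht.1, List.length_set, hlen]
              have h2 : (vis.set v true).count false + 1 = vis.count false :=
                pvCount_false_set_true hvlen hvf
              omega
            exact ih t x hxlt ht.1 hcond.2 hcnt a' b' ha' (by simpa using hta) hb' hab'
        · rw [if_neg hcond]
          exact ht
    show ((List.range c.length).foldl _ (vis.set v true)).getD b false = true
    by_cases hav : a = v
    · exact hnb (List.range c.length) (vis.set v true)
        (by rw [List.length_set]; exact hlen) b (List.mem_range.mpr hb) hb (hav ▸ hab)
    · have hset : (vis.set v true).getD a false = false := by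
        rw [pvGetD_set_other vis v a true false hav]; exact hva
      exact hmain.2.2 a b hRa hset hb hab

lemma pvDfsA_marked_of_reach (c : List (List Int)) (hn : 0 < c.length) (a : Nat)
    (hr : pvReach c a) :
    (pvDfsA c (c.length + 1) 0 (List.replicate c.length false)).getD a false = true := by
  induction hr with
  | refl =>
    exact pvDfsA_marks c (by omega) (by rw [List.length_replicate]; exact hn)
  | tail hst hedge ihst =>
    obtain ⟨hbn, han, hent⟩ := hedge
    exact pvDfsA_closed c (c.length + 1) (List.replicate c.length false) 0 hn
      (List.length_replicate) (pvGetD_replicate_false _ _)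
      (by simp) _ _ ihst (pvGetD_replicate_false _ _) han hent

lemma pvDfsA_char (c : List (List Int)) (hn : 0 < c.length) (a : Nat) :
    (pvDfsA c (c.length + 1) 0 (List.replicate c.length false)).getD a false = true ↔
      (pvReach c a ∧ a < c.length) := by
  constructor
  · intro h
    refine ⟨?_, ?_⟩
    · rcases pvDfsA_sound c (c.length + 1) 0 (List.replicate c.length false) hn a h with h' | h'
      · rw [pvGetD_replicate_false] at h'; exact absurd h' (by simp)
      · exact h'
    · have := pvGetD_lt_len h
      rwa [pvDfsA_length, List.length_replicate] at this
  · rintro ⟨hr, -⟩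
    exact pvDfsA_marked_of_reach c hn a hr

lemma pvAll_id_iff_getD (r : List Bool) :
    r.all id = true ↔ ∀ a < r.length, r.getD a false = true := by
  rw [List.all_eq_true]
  constructor
  · intro h a ha
    have := h r[a] (List.getElem_mem ha)
    simpa [List.getD_eq_getElem?_getD, List.getElem?_eq_getElem ha] using this
  · intro h x hx
    obtain ⟨k, hk, rfl⟩ := List.mem_iff_getElem.mp hx
    have := h k hk
    simpa [List.getD_eq_getElem?_getD, List.getElem?_eq_getElem hk] using this

lemma pvConnA_iff (c : List (List Int)) (hn : 0 < c.length) :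
    pvIsConnA c c.length = true ↔ ∀ a < c.length, pvReach c a := by
  unfold pvIsConnA
  rw [pvAll_id_iff_getD]
  have hlen : (pvDfsA c (c.length + 1) 0 (List.replicate c.length false)).length = c.length := by
    rw [pvDfsA_length, List.length_replicate]
  rw [hlen]
  constructor
  · intro h a ha
    exact ((pvDfsA_char c hn a).mp (h a ha)).1
  · intro h a ha
    exact (pvDfsA_char c hn a).mpr ⟨h a ha, ha⟩

-- ===== B-side: the fixpoint expansion computes exactly the reachable set =====

lemma pvRound_basic (g : List (List Int)) (st : List Bool × Bool) :
    pvLeB st.1 (pvRound g st).1 ∧ (pvRound g st).1.length = st.1.length ∧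
      (st.2 = true → (pvRound g st).2 = true) := by
  unfold pvRound
  refine List.foldlRecOn _ _
    (motive := fun (t : List Bool × Bool) =>
      pvLeB st.1 t.1 ∧ t.1.length = st.1.length ∧ (st.2 = true → t.2 = true))
    ⟨pvLeB_refl st.1, rfl, fun h => h⟩ ?_
  intro t ht v _
  cases hgv : t.1.getD v false with
  | false => simpa [hgv] using ht
  | true =>
    simp only [if_true]
    refine List.foldlRecOn _ _
      (motive := fun (u : List Bool × Bool) =>
        pvLeB st.1 u.1 ∧ u.1.length = st.1.length ∧ (st.2 = true → u.2 = true))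
      ht ?_
    intro u hu w _
    by_cases hc : pvEnt g v w ≠ 0 ∧ u.1.getD w false = false
    · rw [if_pos hc]
      exact ⟨pvLeB_trans hu.1 (pvSet_true_le u.1 w),
        by rw [List.length_set]; exact hu.2.1, fun _ => rfl⟩
    · rw [if_neg hc]; exact hu

lemma pvRound_sound (g : List (List Int)) (P : Nat → Prop)
    (hP : ∀ v w, P v → pvE g v w → P w) (st : List Bool × Bool)
    (h0 : ∀ a, st.1.getD a false = true → P a) :
    ∀ a, (pvRound g st).1.getD a false = true → P a := by
  unfold pvRound
  refine List.foldlRecOn _ _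
    (motive := fun (t : List Bool × Bool) => ∀ a, t.1.getD a false = true → P a) h0 ?_
  intro t ht v hv
  cases hgv : t.1.getD v false with
  | false => simpa [hgv] using ht
  | true =>
    simp only [if_true]
    have hPv : P v := ht v hgv
    have hvlt : v < g.length := List.mem_range.mp hv
    refine List.foldlRecOn _ _
      (motive := fun (u : List Bool × Bool) => ∀ a, u.1.getD a false = true → P a) ht ?_
    intro u hu w hw
    by_cases hc : pvEnt g v w ≠ 0 ∧ u.1.getD w false = false
    · rw [if_pos hc]
      intro a ha
      rcases pvGetD_set_true_cases ha with rfl | ha'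
      · exact hP v a hPv ⟨hvlt, List.mem_range.mp hw, hc.1⟩
      · exact hu a ha'
    · rw [if_neg hc]; exact hu

lemma pvRound_nochange (g : List (List Int)) (r : List Bool) (hl : r.length = g.length)
    (h : (pvRound g (r, false)).2 = false) :
    (pvRound g (r, false)).1 = r ∧
      ∀ v w, r.getD v false = true → w < g.length → pvEnt g v w ≠ 0 → r.getD w false = true := by
  have inner_false : ∀ (v : Nat) (l : List Nat) (st : List Bool × Bool),
      ((l.foldl (fun st w => if pvEnt g v w ≠ 0 ∧ st.1.getD w false = false then (st.1.set w true, true) else st) st).2 = false) →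
      l.foldl (fun st w => if pvEnt g v w ≠ 0 ∧ st.1.getD w false = false then (st.1.set w true, true) else st) st = st ∧
        ∀ w ∈ l, ¬(pvEnt g v w ≠ 0 ∧ st.1.getD w false = false) := by
    intro v l
    induction l with
    | nil => intro st _; exact ⟨rfl, by simp⟩
    | cons x l' ihl =>
      intro st hfold
      rw [List.foldl_cons] at hfold ⊢
      by_cases hc : pvEnt g v x ≠ 0 ∧ st.1.getD x false = false
      · exfalso
        rw [if_pos hc] at hfold
        have := (ihl _ hfold).1
        rw [this] at hfold
        simp at hfold
      · rw [if_neg hc] at hfold ⊢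
        obtain ⟨h1, h2⟩ := ihl st hfold
        refine ⟨h1, ?_⟩
        intro w hw
        rcases List.mem_cons.mp hw with rfl | hw'
        · exact hc
        · exact h2 w hw'
  have outer_false : ∀ (l : List Nat) (st : List Bool × Bool),
      ((l.foldl (fun st v => if st.1.getD v false then
          (List.range g.length).foldl (fun st w => if pvEnt g v w ≠ 0 ∧ st.1.getD w false = false then (st.1.set w true, true) else st) st
        else st) st).2 = false) →
      l.foldl (fun st v => if st.1.getD v false then
          (List.range g.length).foldl (fun st w => if pvEnt g v w ≠ 0 ∧ st.1.getD w false = false then (st.1.set w true, true) else st) st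
        else st) st = st ∧
        ∀ v ∈ l, st.1.getD v false = true →
          ∀ w ∈ List.range g.length, ¬(pvEnt g v w ≠ 0 ∧ st.1.getD w false = false) := by
    intro l
    induction l with
    | nil => intro st _; exact ⟨rfl, by simp⟩
    | cons v l' ihl =>
      intro st hfold
      rw [List.foldl_cons] at hfold ⊢
      by_cases hgv : st.1.getD v false = true
      case neg =>
        rw [if_neg hgv] at hfold ⊢
        obtain ⟨h1, h2⟩ := ihl st hfold
        refine ⟨h1, ?_⟩
        intro v' hv' hgv'
        rcases List.mem_cons.mp hv' with rfl | hv''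
        · exact absurd hgv' hgv
        · exact h2 v' hv'' hgv'
      case pos =>
        rw [if_pos hgv] at hfold ⊢
        obtain ⟨h1, h2⟩ := ihl _ hfold
        rw [h1] at hfold
        obtain ⟨hi1, hi2⟩ := inner_false v (List.range g.length) st hfold
        rw [hi1] at h1 h2 ⊢
        refine ⟨h1, ?_⟩
        intro v' hv' hgv'
        rcases List.mem_cons.mp hv' with rfl | hv''
        · exact hi2
        · exact h2 v' hv'' hgv'
  unfold pvRound
  obtain ⟨h1, h2⟩ := outer_false (List.range g.length) (r, false) (by unfold pvRound at h; exact h)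
  refine ⟨by rw [h1], ?_⟩
  intro v w hv hw hent
  have hvlt : v < g.length := by
    have := pvGetD_lt_len hv; omega
  have := h2 v (List.mem_range.mpr hvlt) hv w (List.mem_range.mpr hw)
  push Not at this
  simpa using this hent

lemma pvRound_changed (g : List (List Int)) (r : List Bool) (hl : r.length = g.length)
    (h : (pvRound g (r, false)).2 = true) :
    (pvRound g (r, false)).1.count false < r.count false := by
  suffices hs : (pvRound g (r, false)).1.length = r.length ∧ pvLeB r (pvRound g (r, false)).1 ∧
      ((pvRound g (r, false)).2 = true → (pvRound g (r, false)).1.count false < r.count false) by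
    exact hs.2.2 h
  unfold pvRound
  refine List.foldlRecOn _ _
    (motive := fun (t : List Bool × Bool) =>
      t.1.length = r.length ∧ pvLeB r t.1 ∧ (t.2 = true → t.1.count false < r.count false))
    ⟨rfl, pvLeB_refl r, by simp⟩ ?_
  intro t ht v _
  cases hgv : t.1.getD v false with
  | false => simpa [hgv] using ht
  | true =>
    simp only [if_true]
    refine List.foldlRecOn _ _
      (motive := fun (u : List Bool × Bool) =>
        u.1.length = r.length ∧ pvLeB r u.1 ∧ (u.2 = true → u.1.count false < r.count false))
      ht ?_
    intro u hu w hw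
    by_cases hc : pvEnt g v w ≠ 0 ∧ u.1.getD w false = false
    · rw [if_pos hc]
      have hwlt : w < u.1.length := by
        rw [hu.1, hl]; exact List.mem_range.mp hw
      have hcnt : (u.1.set w true).count false + 1 = u.1.count false :=
        pvCount_false_set_true hwlt hc.2
      have hle : u.1.count false ≤ r.count false :=
        pvCount_false_mono r u.1 hu.1 hu.2.1
      exact ⟨by rw [List.length_set]; exact hu.1,
        pvLeB_trans hu.2.1 (pvSet_true_le u.1 w), fun _ => by
          show (u.1.set w true).count false < r.count false
          omega⟩
    · rw [if_neg hc]; exact hu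

lemma pvLoopB_succ (g : List (List Int)) (f : Nat) (r : List Bool) :
    pvLoopB g (f + 1) r =
      if (pvRound g (r, false)).2 = true then pvLoopB g f (pvRound g (r, false)).1
      else (pvRound g (r, false)).1 := rfl

lemma pvLoopB_length (g : List (List Int)) :
    ∀ f r, (pvLoopB g f r).length = r.length := by
  intro f
  induction f with
  | zero => intro r; rfl
  | succ f ih =>
    intro r
    rw [pvLoopB_succ]
    by_cases hc : (pvRound g (r, false)).2 = true
    · rw [if_pos hc, ih]; exact (pvRound_basic g (r, false)).2.1
    · rw [if_neg hc]; exact (pvRound_basic g (r, false)).2.1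

lemma pvLoopB_mono (g : List (List Int)) : ∀ f r, pvLeB r (pvLoopB g f r) := by
  intro f
  induction f with
  | zero => intro r; exact pvLeB_refl r
  | succ f ih =>
    intro r
    rw [pvLoopB_succ]
    by_cases hc : (pvRound g (r, false)).2 = true
    · rw [if_pos hc]; exact pvLeB_trans (pvRound_basic g (r, false)).1 (ih _)
    · rw [if_neg hc]; exact (pvRound_basic g (r, false)).1

lemma pvLoopB_sound (g : List (List Int)) (P : Nat → Prop)
    (hP : ∀ v w, P v → pvE g v w → P w) :
    ∀ f r, (∀ a, r.getD a false = true → P a) →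
      ∀ a, (pvLoopB g f r).getD a false = true → P a := by
  intro f
  induction f with
  | zero => intro r h0 a ha; exact h0 a ha
  | succ f ih =>
    intro r h0 a
    rw [pvLoopB_succ]
    by_cases hc : (pvRound g (r, false)).2 = true
    · rw [if_pos hc]
      exact ih _ (pvRound_sound g P hP (r, false) h0) a
    · rw [if_neg hc]
      exact pvRound_sound g P hP (r, false) h0 a

lemma pvLoopB_closed (g : List (List Int)) :
    ∀ f r, r.length = g.length → r.count false < f →
      ∀ v w, (pvLoopB g f r).getD v false = true → w < g.length → pvEnt g v w ≠ 0 →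
        (pvLoopB g f r).getD w false = true := by
  intro f
  induction f with
  | zero => intro r _ hcf; exact absurd hcf (Nat.not_lt_zero _)
  | succ f ih =>
    intro r hl hcf v w
    rw [pvLoopB_succ]
    by_cases hc : (pvRound g (r, false)).2 = true
    · rw [if_pos hc]
      refine ih _ ?_ ?_ v w
      · rw [(pvRound_basic g (r, false)).2.1]; exact hl
      · have := pvRound_changed g r hl hc; omega
    · rw [if_neg hc]
      have hnc := pvRound_nochange g r hl (by simpa using hc)
      rw [hnc.1]
      exact fun hv hw hent => hnc.2 v w hv hw hent

lemma pvLoopB_char (g : List (List Int)) (hn : 0 < g.length) (a : Nat) :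
    (pvLoopB g g.length ((List.replicate g.length false).set 0 true)).getD a false = true ↔
      (pvReach g a ∧ a < g.length) := by
  have hr1len : ((List.replicate g.length false).set 0 true).length = g.length := by
    rw [List.length_set, List.length_replicate]
  have hcnt : ((List.replicate g.length false).set 0 true).count false + 1 = g.length := by
    have := pvCount_false_set_true (r := List.replicate g.length false) (v := 0)
      (by rw [List.length_replicate]; exact hn) (pvGetD_replicate_false _ _)
    simpa [List.count_replicate] using this
  constructor
  · intro h
    refine ⟨?_, ?_⟩
    · refine pvLoopB_sound g (pvReach g)
        (fun v w hv he => Relation.ReflTransGen.tail hv he) g.length _ ?_ a h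
      intro a' ha'
      rcases pvGetD_set_true_cases ha' with rfl | ha''
      · exact Relation.ReflTransGen.refl
      · rw [pvGetD_replicate_false] at ha''; exact absurd ha'' (by simp)
    · have := pvGetD_lt_len h
      rwa [pvLoopB_length, hr1len] at this
  · rintro ⟨hr, -⟩
    induction hr with
    | refl =>
      exact pvLoopB_mono g g.length _ 0
        (pvGetD_set_self (by rw [List.length_replicate]; exact hn))
    | tail hst hedge ihst =>
      obtain ⟨hbn, han, hent⟩ := hedge
      exact pvLoopB_closed g g.length _ hr1len (by omega) _ _ ihst han hent

lemma pvReachB_iff (g : List (List Int)) (hn : 0 < g.length) :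
    pvReachAllB g g.length = true ↔ ∀ a < g.length, pvReach g a := by
  unfold pvReachAllB
  simp only [if_pos hn]
  rw [pvAll_id_iff_getD, pvLoopB_length, List.length_set, List.length_replicate]
  constructor
  · intro h a ha
    exact ((pvLoopB_char g hn a).mp (h a ha)).1
  · intro h a ha
    exact (pvLoopB_char g hn a).mpr ⟨h a ha, ha⟩

lemma pvConnA_eq_reachB (g : List (List Int)) : pvIsConnA g g.length = pvReachAllB g g.length := by
  by_cases hn : 0 < g.length
  · rw [Bool.eq_iff_iff, pvConnA_iff g hn, pvReachB_iff g hn]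
  · have h0 : g.length = 0 := by omega
    rw [h0]
    simp [pvIsConnA, pvReachAllB, pvDfsA, h0]

-- ===== the cut matrix =====

lemma pvEnt_cut (c : List (List Int)) (i j : Nat) (h : pvEnt c i j = 1) (v w : Nat) :
    pvEnt (pvCut c i j) v w = if v = i ∧ w = j then 0 else pvEnt c v w := by
  have hi : i < c.length := by
    by_contra hic
    rw [pvEnt, List.getD_eq_default c [] (n := i) (by omega)] at h
    simp at h
  have hj : j < (c.getD i []).length := by
    by_contra hjc
    rw [pvEnt, List.getD_eq_default (c.getD i []) 0 (n := j) (by omega)] at h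
    simp at h
  by_cases hvi : v = i
  · subst hvi
    rw [pvEnt, pvCut, pvGetD_set_self hi]
    by_cases hwj : w = j
    · subst hwj
      rw [pvGetD_set_self hj, if_pos ⟨rfl, rfl⟩]
    · rw [pvGetD_set_other _ _ _ _ _ hwj, if_neg (by tauto)]
      rfl
  · rw [pvEnt, pvCut, pvGetD_set_other c i v _ [] hvi, if_neg (by tauto)]
    rfl

lemma pvCut_length (c : List (List Int)) (i j : Nat) : (pvCut c i j).length = c.length :=
  List.length_set ..

lemma pvReach_cut_mono (c : List (List Int)) (i j : Nat) (h : pvEnt c i j = 1) (a : Nat) :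
    pvReach (pvCut c i j) a → pvReach c a := by
  intro hr
  refine Relation.ReflTransGen.mono ?_ hr
  intro x y hxy
  obtain ⟨hx, hy, hent⟩ := hxy
  rw [pvCut_length] at hx hy
  refine ⟨hx, hy, ?_⟩
  rw [pvEnt_cut c i j h x y] at hent
  by_cases hxy2 : x = i ∧ y = j
  · rw [if_pos hxy2] at hent; exact absurd rfl hent
  · rwa [if_neg hxy2] at hent

lemma pvCutConn_false (c : List (List Int)) (hd : pvReachAllB c c.length = false)
    {i j : Nat} (hi : i < c.length) (hj : j < c.length) (h1 : pvEnt c i j = 1) :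
    pvIsConnA (pvCut c i j) c.length = false := by
  have hn : 0 < c.length := Nat.zero_lt_of_lt hi
  by_contra hcon
  rw [Bool.not_eq_false] at hcon
  have hcl : (pvCut c i j).length = c.length := pvCut_length c i j
  rw [← hcl] at hcon
  have hAll : ∀ a < (pvCut c i j).length, pvReach (pvCut c i j) a :=
    (pvConnA_iff (pvCut c i j) (by rw [hcl]; exact hn)).mp hcon
  have hAllc : ∀ a < c.length, pvReach c a := fun a ha =>
    pvReach_cut_mono c i j h1 a (hAll a (by rw [hcl]; exact ha))
  have := (pvReachB_iff c hn).mpr hAllc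
  rw [hd] at this
  exact absurd this (by simp)

-- ===== counting =====

lemma pvMapCastSum {α : Type} (l : List α) (g : α → Nat) :
    (l.map (fun x => ((g x : Nat) : Int))).sum = ((l.map g).sum : Int) := by
  induction l with
  | nil => simp
  | cons x t ih => simp [ih]

lemma pvSolutionA_sum (c : List (List Int)) :
    solution c = ((List.range c.length).map (fun i =>
      (((List.range c.length).countP (fun j =>
        decide (pvEnt c i j = 1) && !(pvIsConnA (pvCut c i j) c.length)) : Nat) : Int))).sum := by
  unfold solution
  have houter : (fun (acc : Int) (i : Nat) =>
      (List.range c.length).foldl (fun acc j =>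
        if pvEnt c i j = 1 then
          if pvIsConnA (pvCut c i j) c.length = false then acc + 1 else acc
        else acc) acc) =
      (fun (acc : Int) (i : Nat) => acc + (((List.range c.length).countP (fun j =>
        decide (pvEnt c i j = 1) && !(pvIsConnA (pvCut c i j) c.length)) : Nat) : Int)) := by
    funext acc i
    have hfun : (fun (acc : Int) (j : Nat) =>
        if pvEnt c i j = 1 then
          if pvIsConnA (pvCut c i j) c.length = false then acc + 1 else acc
        else acc) =
        (fun (acc : Int) (j : Nat) =>
          if (decide (pvEnt c i j = 1) && !(pvIsConnA (pvCut c i j) c.length)) = true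
          then acc + 1 else acc) := by
      funext acc j
      by_cases h1 : pvEnt c i j = 1
      · cases hb : pvIsConnA (pvCut c i j) c.length <;> simp [h1]
      · simp [h1]
    rw [hfun, PySem.List.foldl_count_if]
  rw [houter, PySem.List.foldl_add, zero_add]

lemma pvConnA_eq_reachB' (g : List (List Int)) (n : Nat) (hn : g.length = n) :
    pvIsConnA g n = pvReachAllB g n := by
  subst hn; exact pvConnA_eq_reachB g

lemma pvMain (c : List (List Int)) : solution c = solution_alt c := by
  have hmap : c.map (fun row => row) = c := List.map_id' c
  unfold solution_alt
  simp only [hmap]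
  by_cases hb : pvReachAllB c c.length = false
  · rw [if_pos hb, pvSolutionA_sum]
    have hcong : ∀ i ∈ List.range c.length,
        ((((List.range c.length).countP (fun j =>
          decide (pvEnt c i j = 1) && !(pvIsConnA (pvCut c i j) c.length))) : Nat) : Int) =
        ((((List.range c.length).countP (fun j => decide (pvEnt c i j = 1))) : Nat) : Int) := by
      intro i hi
      congr 1
      apply List.countP_congr
      intro j hj
      by_cases h1 : pvEnt c i j = 1
      · have := pvCutConn_false c hb (List.mem_range.mp hi) (List.mem_range.mp hj) h1
        simp [h1, this]
      · simp [h1]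
    rw [List.map_congr_left hcong, pvMapCastSum]
    have hlen : (pvOnes c).length = ((List.range c.length).map (fun i =>
        (List.range c.length).countP (fun j => decide (pvEnt c i j = 1)))).sum := by
      unfold pvOnes
      rw [List.length_flatMap]
      congr 1
      refine List.map_congr_left ?_
      intro i _
      rw [List.length_map]
      exact List.countP_eq_length_filter.symm
    rw [hlen]
  · rw [if_neg hb, pvSolutionA_sum]
    have hfun : (fun (cnt : Int) (p : Nat × Nat) =>
        if pvReachAllB (c.set p.1 ((c.getD p.1 []).set p.2 0)) c.length = false then cnt + 1
        else cnt) =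
        (fun (cnt : Int) (p : Nat × Nat) =>
          if (!(pvReachAllB (c.set p.1 ((c.getD p.1 []).set p.2 0)) c.length)) = true then cnt + 1
          else cnt) := by
      funext cnt p
      cases hx : pvReachAllB (c.set p.1 ((c.getD p.1 []).set p.2 0)) c.length <;> simp
    rw [hfun, PySem.List.foldl_count_if, zero_add, pvMapCastSum]
    congr 1
    unfold pvOnes
    rw [List.countP_flatMap]
    congr 1
    refine List.map_congr_left ?_
    intro i _
    show _ = ((List.countP (fun p => !pvReachAllB (c.set p.1 ((c.getD p.1 []).set p.2 0)) c.length)) ∘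
      (fun i => ((List.range c.length).filter (fun j => decide (pvEnt c i j = 1))).map (fun j => (i, j)))) i
    rw [Function.comp_apply, List.countP_map, List.countP_filter]
    apply List.countP_congr
    intro j _
    show (decide (pvEnt c i j = 1) && !pvIsConnA (pvCut c i j) c.length) = true ↔
      ((!pvReachAllB (c.set i ((c.getD i []).set j 0)) c.length) && decide (pvEnt c i j = 1)) = true
    have hraw : pvCut c i j = c.set i ((c.getD i []).set j 0) := rfl
    rw [← hraw, pvConnA_eq_reachB' (pvCut c i j) c.length (pvCut_length c i j), Bool.and_comm]

-- ===== VERDICT (by name: the statement is the Claim_ definition above) =====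
theorem solution_spec : Claim_equal_solution := by
  intro c _ _
  unfold Spec_solution
  exact pvMain c
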